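-- pv_equiv track=rewrite | github.com/codyjkeller/ai-tprm-analyzer | src/analyzer.py | analyze_risk
-- ===== SOURCE A (Python) =====
-- from typing import Dict, Any, Tuple, List
--
-- RISK_WEIGHTS = {
--     "mfa_failure": 25,        # Access Control
--     "sox_failure": 25,        # Financial Compliance
--     "encrypt_failure": 20,    # Data Protection
--     "residency_failure": 15,  # GDPR/Privacy
--     "sla_failure": 10,        # Availability
--     "subproc_failure": 5      # Supply Chain
-- }
--
-- REMEDIATION_MAP = {
--     "mfa_failure": "MANDATORY: Enforce SSO/MFA for all users, including contractors.",
--     "sox_failure": "CRITICAL: Revoke developer access to production environment immediately.",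
--     "encrypt_failure": "Reject weak cyphers. Require AES-256 for storage and TLS 1.3 for transit.",
--     "residency_failure": "Data Sovereignty Risk: Require EU-only hosting or SCCs (Standard Contractual Clauses).",
--     "sla_failure": "Contractual Amendment: Enforce 24h SEV1 Notification SLA.",
--     "subproc_failure": "Vendor Review: Require list of 4th-party subprocessors for review."
-- }
--
-- def analyze_risk(policy: Dict[str, Any], vendor: Dict[str, Any]) -> Tuple[List[Dict[str, Any]], int]:
--     """
--     Analyzes vendor answers against risk heuristics.
--     """
--     results = []
--     answers = vendor.get('answers', {})
--     profile = vendor.get('vendor_profile', {})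
--     current_score = 100
--
--     # --- CHECK 1: ACCESS CONTROL (MFA) ---
--     mfa_status = answers.get('mfa_status', '').lower()
--     if "shared" in mfa_status or "contractors" in mfa_status:
--         current_score -= RISK_WEIGHTS['mfa_failure']
--         results.append({
--             "domain": "Identity (IAM)",
--             "status": "FAIL",
--             "severity": "Critical",
--             "finding": "Contractors utilizing shared credentials/no MFA.",
--             "fix": REMEDIATION_MAP['mfa_failure']
--         })
--     else:
--         results.append({"domain": "Identity (IAM)", "status": "PASS", "severity": "Low", "finding": "MFA Standard Met", "fix": "-"})
--
--     # --- CHECK 2: DATA PROTECTION (Encryption) ---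
--     encryption_ans = answers.get('encryption', '')
--     if any(x in encryption_ans for x in ['DES', 'MD5', 'RC4']):
--         current_score -= RISK_WEIGHTS['encrypt_failure']
--         results.append({
--             "domain": "Data Security",
--             "status": "FAIL",
--             "severity": "High",
--             "finding": f"Weak Encryption Algorithm Detected: {encryption_ans}",
--             "fix": REMEDIATION_MAP['encrypt_failure']
--         })
--
--     # --- CHECK 3: DATA SOVEREIGNTY (GDPR/Locality) ---
--     hosting_ans = answers.get('hosting', '').lower()
--     if "globally" in hosting_ans or "apac" in hosting_ans:
--         current_score -= RISK_WEIGHTS['residency_failure']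
--         results.append({
--             "domain": "Privacy (GDPR)",
--             "status": "WARN",
--             "severity": "Medium",
--             "finding": "Uncontrolled Global Replication Detected.",
--             "fix": REMEDIATION_MAP['residency_failure']
--         })
--
--     # --- CHECK 4: COMPLIANCE (SOX/ITGC) ---
--     change_mgmt = answers.get('change_management', '').lower()
--     if profile.get('type') == 'Public' and "developers" in change_mgmt:
--         current_score -= RISK_WEIGHTS['sox_failure']
--         results.append({
--             "domain": "Compliance (SOX)",
--             "status": "FAIL",
--             "severity": "Critical",
--             "finding": "Segregation of Duties Conflict (Dev access to Prod).",
--             "fix": REMEDIATION_MAP['sox_failure']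
--         })
--
--     return results, max(current_score, 0)
-- ===== SOURCE B (Python) =====
-- # Staged re-implementation: each check is an independent pure function returning a
-- # result row (or None); the score is not tracked during checking but derived
-- # afterwards from the emitted rows via a domain->penalty table.
--
-- _PENALTY = {
--     "Identity (IAM)": 25,
--     "Data Security": 20,
--     "Privacy (GDPR)": 15,
--     "Compliance (SOX)": 25,
-- }
--
-- def _check_iam(answers):
--     v = answers.get('mfa_status', '').lower()
--     if "shared" in v or "contractors" in v:
--         return {"domain": "Identity (IAM)", "status": "FAIL", "severity": "Critical",
--                 "finding": "Contractors utilizing shared credentials/no MFA.",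
--                 "fix": "MANDATORY: Enforce SSO/MFA for all users, including contractors."}
--     return {"domain": "Identity (IAM)", "status": "PASS", "severity": "Low",
--             "finding": "MFA Standard Met", "fix": "-"}
--
-- def _check_encryption(answers):
--     v = answers.get('encryption', '')  # deliberately NOT lowercased
--     if any(x in v for x in ['DES', 'MD5', 'RC4']):
--         return {"domain": "Data Security", "status": "FAIL", "severity": "High",
--                 "finding": "Weak Encryption Algorithm Detected: " + v,
--                 "fix": "Reject weak cyphers. Require AES-256 for storage and TLS 1.3 for transit."}
--     return None
--
-- def _check_residency(answers):
--     v = answers.get('hosting', '').lower()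
--     if "globally" in v or "apac" in v:
--         return {"domain": "Privacy (GDPR)", "status": "WARN", "severity": "Medium",
--                 "finding": "Uncontrolled Global Replication Detected.",
--                 "fix": "Data Sovereignty Risk: Require EU-only hosting or SCCs (Standard Contractual Clauses)."}
--     return None
--
-- def _check_sox(answers, profile):
--     v = answers.get('change_management', '').lower()
--     if profile.get('type') == 'Public' and "developers" in v:
--         return {"domain": "Compliance (SOX)", "status": "FAIL", "severity": "Critical",
--                 "finding": "Segregation of Duties Conflict (Dev access to Prod).",
--                 "fix": "CRITICAL: Revoke developer access to production environment immediately."}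
--     return None
--
-- def analyze_risk(policy, vendor):
--     answers = vendor.get('answers', {})
--     profile = vendor.get('vendor_profile', {})
--     # stage 1: run the independent checks, keep the rows they emit
--     maybe_rows = (_check_iam(answers), _check_encryption(answers),
--                   _check_residency(answers), _check_sox(answers, profile))
--     results = [r for r in maybe_rows if r is not None]
--     # stage 2: derive the score from the finished results
--     penalty = sum(_PENALTY[r["domain"]] for r in results if r["status"] != "PASS")
--     return results, max(100 - penalty, 0)
-- ===== Notes on version B (the rewrite author's own statement) =====
-- stated objective: alternative
-- what changed: Decomposed into two stages: four independent pure check functions each emit an optional result row, the rows are collected by filtering, and the score is no longer tracked alongside the checks but derived afterwards from the emitted rows via a domain-to-penalty lookup.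
import Mathlib
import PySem

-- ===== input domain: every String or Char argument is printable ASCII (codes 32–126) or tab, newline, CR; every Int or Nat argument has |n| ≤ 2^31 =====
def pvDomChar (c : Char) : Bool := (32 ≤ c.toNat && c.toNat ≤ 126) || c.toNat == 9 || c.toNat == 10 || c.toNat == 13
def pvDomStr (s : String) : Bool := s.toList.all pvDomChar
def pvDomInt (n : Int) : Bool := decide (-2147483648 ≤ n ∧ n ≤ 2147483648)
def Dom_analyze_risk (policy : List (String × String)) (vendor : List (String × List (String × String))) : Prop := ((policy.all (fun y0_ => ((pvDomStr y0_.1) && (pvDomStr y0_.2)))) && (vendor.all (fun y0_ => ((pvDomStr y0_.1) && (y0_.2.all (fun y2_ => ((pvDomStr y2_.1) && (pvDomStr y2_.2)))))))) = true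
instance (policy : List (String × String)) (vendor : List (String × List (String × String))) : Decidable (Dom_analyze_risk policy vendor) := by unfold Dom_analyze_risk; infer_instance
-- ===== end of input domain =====

-- B restructures A's single interleaved pass into two stages: independent pure check
-- functions emitting optional rows, then a score derived from the rows (objective: alternative).


-- ===== PORT A =====
-- module constants RISK_WEIGHTS / REMEDIATION_MAP, ported as literal dicts
def pvRiskWeights : PySem.Dict String Int := PySem.Dict.mk
  [("mfa_failure", 25), ("sox_failure", 25), ("encrypt_failure", 20),
   ("residency_failure", 15), ("sla_failure", 10), ("subproc_failure", 5)]

def pvRemediationMap : PySem.Dict String String := PySem.Dict.mk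
  [("mfa_failure", "MANDATORY: Enforce SSO/MFA for all users, including contractors."),
   ("sox_failure", "CRITICAL: Revoke developer access to production environment immediately."),
   ("encrypt_failure", "Reject weak cyphers. Require AES-256 for storage and TLS 1.3 for transit."),
   ("residency_failure", "Data Sovereignty Risk: Require EU-only hosting or SCCs (Standard Contractual Clauses)."),
   ("sla_failure", "Contractual Amendment: Enforce 24h SEV1 Notification SLA."),
   ("subproc_failure", "Vendor Review: Require list of 4th-party subprocessors for review.")]

def analyze_risk (policy : List (String × String)) (vendor : List (String × List (String × String))) : (List (List (String × String))) × Int :=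
  let results : List (List (String × String)) := []
  let answers : PySem.Dict String String := PySem.Dict.mk ((PySem.Dict.mk vendor).getD "answers" [])
  let profile : PySem.Dict String String := PySem.Dict.mk ((PySem.Dict.mk vendor).getD "vendor_profile" [])
  let currentScore : Int := 100
  -- CHECK 1: ACCESS CONTROL (MFA)
  let mfaStatus := PySem.Str.lower (answers.getD "mfa_status" "")
  let (results, currentScore) :=
    if PySem.Str.isIn "shared" mfaStatus || PySem.Str.isIn "contractors" mfaStatus then
      (results ++ [[("domain", "Identity (IAM)"), ("status", "FAIL"), ("severity", "Critical"),
                    ("finding", "Contractors utilizing shared credentials/no MFA."),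
                    ("fix", (pvRemediationMap.get? "mfa_failure").getD "")]],
       currentScore - (pvRiskWeights.get? "mfa_failure").getD 0)
    else
      (results ++ [[("domain", "Identity (IAM)"), ("status", "PASS"), ("severity", "Low"),
                    ("finding", "MFA Standard Met"), ("fix", "-")]], currentScore)
  -- CHECK 2: DATA PROTECTION (Encryption) — NOT lowercased, as in the source
  let encryptionAns := answers.getD "encryption" ""
  let (results, currentScore) :=
    if (["DES", "MD5", "RC4"].any fun x => PySem.Str.isIn x encryptionAns) then
      (results ++ [[("domain", "Data Security"), ("status", "FAIL"), ("severity", "High"),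
                    ("finding", "Weak Encryption Algorithm Detected: " ++ encryptionAns),
                    ("fix", (pvRemediationMap.get? "encrypt_failure").getD "")]],
       currentScore - (pvRiskWeights.get? "encrypt_failure").getD 0)
    else (results, currentScore)
  -- CHECK 3: DATA SOVEREIGNTY (GDPR/Locality)
  let hostingAns := PySem.Str.lower (answers.getD "hosting" "")
  let (results, currentScore) :=
    if PySem.Str.isIn "globally" hostingAns || PySem.Str.isIn "apac" hostingAns then
      (results ++ [[("domain", "Privacy (GDPR)"), ("status", "WARN"), ("severity", "Medium"),
                    ("finding", "Uncontrolled Global Replication Detected."),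
                    ("fix", (pvRemediationMap.get? "residency_failure").getD "")]],
       currentScore - (pvRiskWeights.get? "residency_failure").getD 0)
    else (results, currentScore)
  -- CHECK 4: COMPLIANCE (SOX/ITGC)
  let changeMgmt := PySem.Str.lower (answers.getD "change_management" "")
  let (results, currentScore) :=
    if profile.get? "type" == some "Public" && PySem.Str.isIn "developers" changeMgmt then
      (results ++ [[("domain", "Compliance (SOX)"), ("status", "FAIL"), ("severity", "Critical"),
                    ("finding", "Segregation of Duties Conflict (Dev access to Prod)."),
                    ("fix", (pvRemediationMap.get? "sox_failure").getD "")]],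
       currentScore - (pvRiskWeights.get? "sox_failure").getD 0)
    else (results, currentScore)
  (results, max currentScore 0)

-- ===== PORT B =====
-- B: four independent pure check functions, rows collected by filtering out None,
-- score derived afterwards from the rows via the domain->penalty table.
def pvPenalty : PySem.Dict String Int := PySem.Dict.mk
  [("Identity (IAM)", 25), ("Data Security", 20), ("Privacy (GDPR)", 15), ("Compliance (SOX)", 25)]

def pvCheckIam (answers : PySem.Dict String String) : Option (List (String × String)) :=
  let v := PySem.Str.lower (answers.getD "mfa_status" "")
  if PySem.Str.isIn "shared" v || PySem.Str.isIn "contractors" v then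
    some [("domain", "Identity (IAM)"), ("status", "FAIL"), ("severity", "Critical"),
          ("finding", "Contractors utilizing shared credentials/no MFA."),
          ("fix", "MANDATORY: Enforce SSO/MFA for all users, including contractors.")]
  else
    some [("domain", "Identity (IAM)"), ("status", "PASS"), ("severity", "Low"),
          ("finding", "MFA Standard Met"), ("fix", "-")]

def pvCheckEncryption (answers : PySem.Dict String String) : Option (List (String × String)) :=
  let v := answers.getD "encryption" ""   -- deliberately NOT lowercased
  if (["DES", "MD5", "RC4"].any fun x => PySem.Str.isIn x v) then
    some [("domain", "Data Security"), ("status", "FAIL"), ("severity", "High"),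
          ("finding", "Weak Encryption Algorithm Detected: " ++ v),
          ("fix", "Reject weak cyphers. Require AES-256 for storage and TLS 1.3 for transit.")]
  else none

def pvCheckResidency (answers : PySem.Dict String String) : Option (List (String × String)) :=
  let v := PySem.Str.lower (answers.getD "hosting" "")
  if PySem.Str.isIn "globally" v || PySem.Str.isIn "apac" v then
    some [("domain", "Privacy (GDPR)"), ("status", "WARN"), ("severity", "Medium"),
          ("finding", "Uncontrolled Global Replication Detected."),
          ("fix", "Data Sovereignty Risk: Require EU-only hosting or SCCs (Standard Contractual Clauses).")]
  else none

def pvCheckSox (answers profile : PySem.Dict String String) : Option (List (String × String)) :=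
  let v := PySem.Str.lower (answers.getD "change_management" "")
  if profile.get? "type" == some "Public" && PySem.Str.isIn "developers" v then
    some [("domain", "Compliance (SOX)"), ("status", "FAIL"), ("severity", "Critical"),
          ("finding", "Segregation of Duties Conflict (Dev access to Prod)."),
          ("fix", "CRITICAL: Revoke developer access to production environment immediately.")]
  else none

def analyze_risk_alt (policy : List (String × String)) (vendor : List (String × List (String × String))) : (List (List (String × String))) × Int :=
  let answers : PySem.Dict String String := PySem.Dict.mk ((PySem.Dict.mk vendor).getD "answers" [])
  let profile : PySem.Dict String String := PySem.Dict.mk ((PySem.Dict.mk vendor).getD "vendor_profile" [])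
  -- stage 1: run the independent checks, keep the rows they emit
  let results : List (List (String × String)) :=
    [pvCheckIam answers, pvCheckEncryption answers,
     pvCheckResidency answers, pvCheckSox answers profile].filterMap id
  -- stage 2: derive the score from the finished results
  let penalty : Int :=
    (results.filter (fun r => (PySem.Dict.mk r).getD "status" "" ≠ "PASS")).foldl
      (fun s r => s + (pvPenalty.getD ((PySem.Dict.mk r).getD "domain" "") 0)) 0
  (results, max (100 - penalty) 0)

-- ===== PRECONDITION & SPEC =====
def Spec_analyze_risk (policy : List (String × String)) (vendor : List (String × List (String × String))) (out : (List (List (String × String))) × Int) : Prop := out = analyze_risk_alt policy vendor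
instance (policy : List (String × String)) (vendor : List (String × List (String × String))) (out : (List (List (String × String))) × Int) : Decidable (Spec_analyze_risk policy vendor out) := by unfold Spec_analyze_risk; infer_instance

-- ===== CLAIM (what is proved, stated in full; the proofs are below) =====
def Claim_equal_analyze_risk : Prop := ∀ (policy : List (String × String)) (vendor : List (String × List (String × String))), Dom_analyze_risk policy vendor → Spec_analyze_risk policy vendor (analyze_risk policy vendor)

-- ===== LEMMAS AND PROOFS =====

-- ===== VERDICT (by name: the statement is the Claim_ definition above) =====
theorem analyze_risk_spec : Claim_equal_analyze_risk := by
  intro policy vendor _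
  unfold Spec_analyze_risk analyze_risk analyze_risk_alt
  unfold pvCheckIam pvCheckEncryption pvCheckResidency pvCheckSox
  dsimp only
  split_ifs <;>
    simp_all [pvRemediationMap, pvRiskWeights, pvPenalty, PySem.Dict.get?_mk_cons,
              PySem.Dict.getD_eq_get?_getD, List.filterMap, List.filter, List.foldl]
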